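-- pv_equiv track=rewrite | github.com/Junkz3/wrench-board | api/board/parser/_tvw_engine/cipher.py | _encode_one
-- ===== SOURCE A (Python) =====
-- _ROWS: dict[int, bytes] = {
--     # Digits '0'..'9' — output cycles every 3 positions
--     0x30: b"efgefgefge\x00",
--     0x31: b"fghfghfghf\x00",
--     0x32: b"ghighighig\x00",
--     0x33: b"hijhijhijh\x00",
--     0x34: b"ijaijaijai\x00",
--     0x35: b"jabjabjabj\x00",
--     0x36: b"abcabcabca\x00",
--     0x37: b"bcdbcdbcdb\x00",
--     0x38: b"cdecdecdec\x00",
--     0x39: b"defdefdefd\x00",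
--     # Capitals 'A'..'Z' — output cycles every 10 positions
--     0x41: b"FGHIJKLMNO\x00",
--     0x42: b"GHIJKLMNOP\x00",
--     0x43: b"HIJKLMNOPQ\x00",
--     0x44: b"IJKLMNOPQR\x00",
--     0x45: b"JKLMNOPQRS\x00",
--     0x46: b"KLMNOPQRST\x00",
--     0x47: b"LMNOPQRSTU\x00",
--     0x48: b"MNOPQRSTUV\x00",
--     0x49: b"NOPQRSTUVW\x00",
--     0x4a: b"OPQRSTUVWX\x00",
--     0x4b: b"PQRSTUVWXY\x00",
--     0x4c: b"QRSTUVWXYZ\x00",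
--     0x4d: b"RSTUVWXYZA\x00",
--     0x4e: b"STUVWXYZAB\x00",
--     0x4f: b"TUVWXYZABC\x00",
--     0x50: b"UVWXYZABCD\x00",
--     0x51: b"VWXYZABCDE\x00",
--     0x52: b"WXYZABCDEF\x00",
--     0x53: b"XYZABCDEFG\x00",
--     0x54: b"YZABCDEFGH\x00",
--     0x55: b"ZABCDEFGHI\x00",
--     0x56: b"ABCDEFGHIJ\x00",
--     0x57: b"BCDEFGHIJK\x00",
--     0x58: b"CDEFGHIJKL\x00",
--     0x59: b"DEFGHIJKLM\x00",
--     0x5a: b"EFGHIJKLMN\x00",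
--     # Lowercase 'a'..'j' — fed through the digit path (offset = pos % 3)
--     0x61: b"3453453453\x00",
--     0x62: b"2342342342\x00",
--     0x63: b"1231231231\x00",
--     0x64: b"0120120120\x00",
--     0x65: b"9019019019\x00",
--     0x66: b"8908908908\x00",
--     0x67: b"7897897897\x00",
--     0x68: b"6786786786\x00",
--     0x69: b"5675675675\x00",
--     0x6a: b"4564564564\x00",
--     # Lowercase 'k'..'z' — alpha path (offset = pos % 10)
--     0x6b: b"vutsrqponm\x00",
--     0x6c: b"wvutsrqpon\x00",
--     0x6d: b"xwvutsrqpo\x00",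
--     0x6e: b"yxwvutsrqp\x00",
--     0x6f: b"zyxwvutsrq\x00",
--     0x70: b"kzyxwvutsr\x00",
--     0x71: b"lkzyxwvuts\x00",
--     0x72: b"mlkzyxwvut\x00",
--     0x73: b"nmlkzyxwvu\x00",
--     0x74: b"onmlkzyxwv\x00",
--     0x75: b"ponmlkzyxw\x00",
--     0x76: b"qponmlkzyx\x00",
--     0x77: b"rqponmlkzy\x00",
--     0x78: b"srqponmlkz\x00",
--     0x79: b"tsrqponmlk\x00",
--     0x7a: b"utsrqponml\x00",
-- }
--
-- def _encode_one(plain: int, pos: int) -> int: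
--     """Find the input char that `decode` maps to `plain` at position `pos`."""
--     for src, row in _ROWS.items():
--         if (0x30 <= src <= 0x39) or (0x61 <= src <= 0x6a):
--             if row[pos % 3] == plain:
--                 return src
--         else:
--             if row[pos % 10] == plain:
--                 return src
--     return plain  # passes through if no mapping
-- ===== SOURCE B (Python) =====
-- def _encode_one(plain: int, pos: int) -> int:
--     """Find the input char that `decode` maps to `plain` at position `pos`.
--
--     Closed-form inverse: each band of the cipher table is an arithmetic
--     rotation, so the source char is computed directly instead of scanning
--     the 62 rows.  Digit rows output 'a'..'j' (period 3), 'a'..'j' rows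
--     output '0'..'9' (period 3), capital rows rotate 'A'..'Z' (period 10),
--     'k'..'z' rows rotate within 'k'..'z' (period 10).  Bands are disjoint,
--     so the first match of the scan is the unique match here.
--     """
--     i3 = pos % 3
--     i10 = pos % 10
--     if 0x61 <= plain <= 0x6a:                 # 'a'..'j'  <- digit '0'..'9'
--         return 0x30 + (plain - 0x65 - i3) % 10
--     if 0x41 <= plain <= 0x5a:                 # 'A'..'Z'  <- 'A'..'Z'
--         return 0x41 + (plain - 0x46 - i10) % 26
--     if 0x30 <= plain <= 0x39:                 # '0'..'9'  <- 'a'..'j'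
--         return 0x61 + (3 + i3 - (plain - 0x30)) % 10
--     if 0x6b <= plain <= 0x7a:                 # 'k'..'z'  <- 'k'..'z'
--         return 0x6b + (plain - 0x76 + i10) % 16
--     return plain  # passes through if no mapping
-- ===== Notes on version B (the rewrite author's own statement) =====
-- stated objective: simpler
-- what changed: Replaced the per-call linear scan of the 62 cipher rows by a closed-form arithmetic inverse: each row band is a rotation, so the source char is computed from plain and pos with a few modular-arithmetic operations and no table at all.
import Mathlib
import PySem

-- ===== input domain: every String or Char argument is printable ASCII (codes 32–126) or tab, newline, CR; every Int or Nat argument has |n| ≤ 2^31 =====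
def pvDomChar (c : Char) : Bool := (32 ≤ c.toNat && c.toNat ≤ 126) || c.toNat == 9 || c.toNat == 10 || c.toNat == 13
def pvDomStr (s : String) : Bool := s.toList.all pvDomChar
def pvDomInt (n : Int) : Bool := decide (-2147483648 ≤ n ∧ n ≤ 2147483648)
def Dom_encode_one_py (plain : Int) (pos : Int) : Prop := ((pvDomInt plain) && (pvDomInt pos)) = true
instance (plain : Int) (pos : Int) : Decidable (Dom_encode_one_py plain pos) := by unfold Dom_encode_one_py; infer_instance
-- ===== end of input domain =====

-- B replaces A's per-call scan of the 62 cipher rows by a closed-form modular-arithmetic inverse (objective: simpler).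

-- ===== PORT A =====
-- the module constant _ROWS as an insertion-ordered association list (each bytes row as its list of byte values)
def rowsTable : List (Int × List Int) := [
  (48, [101, 102, 103, 101, 102, 103, 101, 102, 103, 101, 0]),
  (49, [102, 103, 104, 102, 103, 104, 102, 103, 104, 102, 0]),
  (50, [103, 104, 105, 103, 104, 105, 103, 104, 105, 103, 0]),
  (51, [104, 105, 106, 104, 105, 106, 104, 105, 106, 104, 0]),
  (52, [105, 106, 97, 105, 106, 97, 105, 106, 97, 105, 0]),
  (53, [106, 97, 98, 106, 97, 98, 106, 97, 98, 106, 0]),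
  (54, [97, 98, 99, 97, 98, 99, 97, 98, 99, 97, 0]),
  (55, [98, 99, 100, 98, 99, 100, 98, 99, 100, 98, 0]),
  (56, [99, 100, 101, 99, 100, 101, 99, 100, 101, 99, 0]),
  (57, [100, 101, 102, 100, 101, 102, 100, 101, 102, 100, 0]),
  (65, [70, 71, 72, 73, 74, 75, 76, 77, 78, 79, 0]),
  (66, [71, 72, 73, 74, 75, 76, 77, 78, 79, 80, 0]),
  (67, [72, 73, 74, 75, 76, 77, 78, 79, 80, 81, 0]),
  (68, [73, 74, 75, 76, 77, 78, 79, 80, 81, 82, 0]),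
  (69, [74, 75, 76, 77, 78, 79, 80, 81, 82, 83, 0]),
  (70, [75, 76, 77, 78, 79, 80, 81, 82, 83, 84, 0]),
  (71, [76, 77, 78, 79, 80, 81, 82, 83, 84, 85, 0]),
  (72, [77, 78, 79, 80, 81, 82, 83, 84, 85, 86, 0]),
  (73, [78, 79, 80, 81, 82, 83, 84, 85, 86, 87, 0]),
  (74, [79, 80, 81, 82, 83, 84, 85, 86, 87, 88, 0]),
  (75, [80, 81, 82, 83, 84, 85, 86, 87, 88, 89, 0]),
  (76, [81, 82, 83, 84, 85, 86, 87, 88, 89, 90, 0]),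
  (77, [82, 83, 84, 85, 86, 87, 88, 89, 90, 65, 0]),
  (78, [83, 84, 85, 86, 87, 88, 89, 90, 65, 66, 0]),
  (79, [84, 85, 86, 87, 88, 89, 90, 65, 66, 67, 0]),
  (80, [85, 86, 87, 88, 89, 90, 65, 66, 67, 68, 0]),
  (81, [86, 87, 88, 89, 90, 65, 66, 67, 68, 69, 0]),
  (82, [87, 88, 89, 90, 65, 66, 67, 68, 69, 70, 0]),
  (83, [88, 89, 90, 65, 66, 67, 68, 69, 70, 71, 0]),
  (84, [89, 90, 65, 66, 67, 68, 69, 70, 71, 72, 0]),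
  (85, [90, 65, 66, 67, 68, 69, 70, 71, 72, 73, 0]),
  (86, [65, 66, 67, 68, 69, 70, 71, 72, 73, 74, 0]),
  (87, [66, 67, 68, 69, 70, 71, 72, 73, 74, 75, 0]),
  (88, [67, 68, 69, 70, 71, 72, 73, 74, 75, 76, 0]),
  (89, [68, 69, 70, 71, 72, 73, 74, 75, 76, 77, 0]),
  (90, [69, 70, 71, 72, 73, 74, 75, 76, 77, 78, 0]),
  (97, [51, 52, 53, 51, 52, 53, 51, 52, 53, 51, 0]),
  (98, [50, 51, 52, 50, 51, 52, 50, 51, 52, 50, 0]),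
  (99, [49, 50, 51, 49, 50, 51, 49, 50, 51, 49, 0]),
  (100, [48, 49, 50, 48, 49, 50, 48, 49, 50, 48, 0]),
  (101, [57, 48, 49, 57, 48, 49, 57, 48, 49, 57, 0]),
  (102, [56, 57, 48, 56, 57, 48, 56, 57, 48, 56, 0]),
  (103, [55, 56, 57, 55, 56, 57, 55, 56, 57, 55, 0]),
  (104, [54, 55, 56, 54, 55, 56, 54, 55, 56, 54, 0]),
  (105, [53, 54, 55, 53, 54, 55, 53, 54, 55, 53, 0]),
  (106, [52, 53, 54, 52, 53, 54, 52, 53, 54, 52, 0]),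
  (107, [118, 117, 116, 115, 114, 113, 112, 111, 110, 109, 0]),
  (108, [119, 118, 117, 116, 115, 114, 113, 112, 111, 110, 0]),
  (109, [120, 119, 118, 117, 116, 115, 114, 113, 112, 111, 0]),
  (110, [121, 120, 119, 118, 117, 116, 115, 114, 113, 112, 0]),
  (111, [122, 121, 120, 119, 118, 117, 116, 115, 114, 113, 0]),
  (112, [107, 122, 121, 120, 119, 118, 117, 116, 115, 114, 0]),
  (113, [108, 107, 122, 121, 120, 119, 118, 117, 116, 115, 0]),
  (114, [109, 108, 107, 122, 121, 120, 119, 118, 117, 116, 0]),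
  (115, [110, 109, 108, 107, 122, 121, 120, 119, 118, 117, 0]),
  (116, [111, 110, 109, 108, 107, 122, 121, 120, 119, 118, 0]),
  (117, [112, 111, 110, 109, 108, 107, 122, 121, 120, 119, 0]),
  (118, [113, 112, 111, 110, 109, 108, 107, 122, 121, 120, 0]),
  (119, [114, 113, 112, 111, 110, 109, 108, 107, 122, 121, 0]),
  (120, [115, 114, 113, 112, 111, 110, 109, 108, 107, 122, 0]),
  (121, [116, 115, 114, 113, 112, 111, 110, 109, 108, 107, 0]),
  (122, [117, 116, 115, 114, 113, 112, 111, 110, 109, 108, 0])]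

-- literal port of A's loop over _ROWS.items(): first row matching plain at the path's index wins, else fall through to plain
def scanRows (plain : Int) (pos : Int) : List (Int × List Int) → Int
  | [] => plain
  | (src, row) :: rest =>
    if (0x30 ≤ src ∧ src ≤ 0x39) ∨ (0x61 ≤ src ∧ src ≤ 0x6a) then
      if PySem.List.pyGet? row (PySem.Int.mod pos 3) = some plain then src
      else scanRows plain pos rest
    else
      if PySem.List.pyGet? row (PySem.Int.mod pos 10) = some plain then src
      else scanRows plain pos rest

def encode_one_py (plain : Int) (pos : Int) : Int :=
  scanRows plain pos rowsTable

-- ===== PORT B =====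
-- closed-form arithmetic inverse of the cipher (transliteration of Source B)
def encode_one_py_alt (plain : Int) (pos : Int) : Int :=
  let i3 := PySem.Int.mod pos 3
  let i10 := PySem.Int.mod pos 10
  if 0x61 ≤ plain ∧ plain ≤ 0x6a then 0x30 + PySem.Int.mod (plain - 0x65 - i3) 10
  else if 0x41 ≤ plain ∧ plain ≤ 0x5a then 0x41 + PySem.Int.mod (plain - 0x46 - i10) 26
  else if 0x30 ≤ plain ∧ plain ≤ 0x39 then 0x61 + PySem.Int.mod (3 + i3 - (plain - 0x30)) 10
  else if 0x6b ≤ plain ∧ plain ≤ 0x7a then 0x6b + PySem.Int.mod (plain - 0x76 + i10) 16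
  else plain

-- ===== PRECONDITION & SPEC =====
def Spec_encode_one_py (plain : Int) (pos : Int) (out : Int) : Prop := out = encode_one_py_alt plain pos
instance (plain : Int) (pos : Int) (out : Int) : Decidable (Spec_encode_one_py plain pos out) := by unfold Spec_encode_one_py; infer_instance

-- ===== CLAIM (what is proved, stated in full; the proofs are below) =====
def Claim_equal_encode_one_py : Prop := ∀ (plain : Int) (pos : Int), Dom_encode_one_py plain pos → Spec_encode_one_py plain pos (encode_one_py plain pos)

-- ===== LEMMAS AND PROOFS =====

-- A's scan with the two loop indices pos % 3 / pos % 10 abstracted out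
def scanG (plain i3 i10 : Int) : List (Int × List Int) → Int
  | [] => plain
  | (src, row) :: rest =>
    if (0x30 ≤ src ∧ src ≤ 0x39) ∨ (0x61 ≤ src ∧ src ≤ 0x6a) then
      if PySem.List.pyGet? row i3 = some plain then src
      else scanG plain i3 i10 rest
    else
      if PySem.List.pyGet? row i10 = some plain then src
      else scanG plain i3 i10 rest

lemma scanRows_eq_scanG (plain pos : Int) (rs : List (Int × List Int)) :
    scanRows plain pos rs = scanG plain (PySem.Int.mod pos 3) (PySem.Int.mod pos 10) rs := by
  induction rs with
  | nil => rfl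
  | cons hd tl ih =>
    obtain ⟨src, row⟩ := hd
    simp only [scanRows, scanG]
    split_ifs <;> simp [ih]

-- the scan, staged: first project each row to its looked-up value, then take the first match
def rowVals (i3 i10 : Int) (rs : List (Int × List Int)) : List (Int × Option Int) :=
  rs.map (fun sr =>
    (sr.1, PySem.List.pyGet? sr.2 (if (0x30 ≤ sr.1 ∧ sr.1 ≤ 0x39) ∨ (0x61 ≤ sr.1 ∧ sr.1 ≤ 0x6a) then i3 else i10)))

def firstSome (plain : Int) : List (Int × Option Int) → Int
  | [] => plain
  | (src, v) :: rest => if v = some plain then src else firstSome plain rest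

lemma scanG_eq_firstSome (plain i3 i10 : Int) (rs : List (Int × List Int)) :
    scanG plain i3 i10 rs = firstSome plain (rowVals i3 i10 rs) := by
  induction rs with
  | nil => rfl
  | cons hd tl ih =>
    obtain ⟨src, row⟩ := hd
    simp only [scanG, rowVals, List.map_cons, firstSome]
    split_ifs <;> simp_all [rowVals]

-- if every value the scan compares against lies in [48, 122] and plain does not, the scan falls through
lemma firstSome_out (plain : Int) (L : List (Int × Option Int))
    (hL : ∀ pr ∈ L, ∀ c, pr.2 = some c → 48 ≤ c ∧ c ≤ 122)
    (hp : plain < 48 ∨ 122 < plain) : firstSome plain L = plain := by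
  induction L with
  | nil => rfl
  | cons hd tl ih =>
    obtain ⟨s, v⟩ := hd
    simp only [firstSome]
    rw [if_neg, ih (fun pr hpr => hL pr (List.mem_cons_of_mem _ hpr))]
    intro hv
    rcases hL (s, v) (List.mem_cons_self) _ hv with ⟨h1, h2⟩
    omega

-- the heart: for each of the 30 (pos % 3, pos % 10) classes, the scan agrees with the closed form
set_option maxHeartbeats 4000000 in
lemma scan_closed_form (plain i3 i10 : Int) (h3a : 0 ≤ i3) (h3b : i3 < 3)
    (h10a : 0 ≤ i10) (h10b : i10 < 10) :
    firstSome plain (rowVals i3 i10 rowsTable) =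
      (if 0x61 ≤ plain ∧ plain ≤ 0x6a then 0x30 + PySem.Int.mod (plain - 0x65 - i3) 10
       else if 0x41 ≤ plain ∧ plain ≤ 0x5a then 0x41 + PySem.Int.mod (plain - 0x46 - i10) 26
       else if 0x30 ≤ plain ∧ plain ≤ 0x39 then 0x61 + PySem.Int.mod (3 + i3 - (plain - 0x30)) 10
       else if 0x6b ≤ plain ∧ plain ≤ 0x7a then 0x6b + PySem.Int.mod (plain - 0x76 + i10) 16
       else plain) := by
  have m10 : ∀ x : Int, PySem.Int.mod x 10 = x % 10 :=
    fun x => PySem.Int.mod_eq_emod_of_pos (by norm_num)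
  have m26 : ∀ x : Int, PySem.Int.mod x 26 = x % 26 :=
    fun x => PySem.Int.mod_eq_emod_of_pos (by norm_num)
  have m16 : ∀ x : Int, PySem.Int.mod x 16 = x % 16 :=
    fun x => PySem.Int.mod_eq_emod_of_pos (by norm_num)
  interval_cases i3 <;> interval_cases i10 <;>
    (by_cases hin : 48 ≤ plain ∧ plain ≤ 122
     · obtain ⟨hp1, hp2⟩ := hin
       interval_cases plain <;> decide
     · rw [firstSome_out plain _ (by decide) (by omega)]
       simp only [m10, m26, m16]
       split_ifs <;> omega)

-- ===== VERDICT (by name: the statement is the Claim_ definition above) =====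
theorem encode_one_py_spec : Claim_equal_encode_one_py := by
  intro plain pos _
  unfold Spec_encode_one_py encode_one_py encode_one_py_alt
  rw [scanRows_eq_scanG, scanG_eq_firstSome]
  exact scan_closed_form plain _ _ (PySem.Int.mod_nonneg pos (by norm_num))
    (PySem.Int.mod_lt pos (by norm_num)) (PySem.Int.mod_nonneg pos (by norm_num))
    (PySem.Int.mod_lt pos (by norm_num))
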